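-- pv_equiv track=rewrite | github.com/rivie13/studio5000-AI-Assistant | src/ai_assistant/enhanced_main_assistant.py | _optimize_ladder_organization
-- ===== SOURCE A (Python) =====
-- def _optimize_ladder_organization(ladder_logic: str) -> str:
--     """Organize ladder logic for better readability and maintenance"""
--
--     lines = ladder_logic.split('\n')
--     organized_lines = []
--
--     # Group related logic together
--     current_section = ""
--     for line in lines:
--         line = line.strip()
--         if not line:
--             continue
--
--         if line.startswith('//'):
--             # Comment line - start new section
--             if current_section and organized_lines:
--                 organized_lines.append("")  # Add blank line between sections
--             current_section = line
--             organized_lines.append(line)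
--         else:
--             organized_lines.append(line)
--
--     return "\n".join(organized_lines)
-- ===== SOURCE B (Python) =====
-- def _group(ls):
--     """ls is empty or starts with a comment line; cut a new section before each later comment."""
--     if not ls:
--         return []
--     k = 1
--     while k < len(ls) and not ls[k].startswith('//'):
--         k += 1
--     return [ls[:k]] + _group(ls[k:])
--
--
-- def _optimize_ladder_organization(ladder_logic: str) -> str:
--     lines = [t for t in (l.strip() for l in ladder_logic.split('\n')) if t]
--     k = 0
--     while k < len(lines) and not lines[k].startswith('//'):
--         k += 1
--     pre, rest = lines[:k], lines[k:]
--     secs = _group(rest)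
--     if secs:
--         secs[0] = pre + secs[0]
--     elif pre:
--         secs = [pre]
--     return '\n\n'.join('\n'.join(s) for s in secs)
-- ===== Notes on version B (the rewrite author's own statement) =====
-- stated objective: simpler
-- what changed: Instead of one pass with a current-section flag that inserts blank marker lines inline, B cleans the lines, splits them into sections (preamble attached to the first comment, a new section at each later comment) and joins the sections with a blank-line separator.
import Mathlib
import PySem

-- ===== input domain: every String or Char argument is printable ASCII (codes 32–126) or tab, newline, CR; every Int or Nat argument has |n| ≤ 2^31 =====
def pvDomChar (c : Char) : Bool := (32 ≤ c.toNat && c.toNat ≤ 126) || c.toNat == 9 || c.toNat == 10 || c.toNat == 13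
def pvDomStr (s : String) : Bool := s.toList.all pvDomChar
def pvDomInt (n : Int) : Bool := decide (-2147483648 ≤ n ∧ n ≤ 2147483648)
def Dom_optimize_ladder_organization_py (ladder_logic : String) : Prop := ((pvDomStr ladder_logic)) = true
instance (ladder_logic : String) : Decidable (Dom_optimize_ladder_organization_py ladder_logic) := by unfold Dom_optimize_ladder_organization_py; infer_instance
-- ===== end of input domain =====

-- B reorganizes the same cleaning into a split-into-sections / join-with-blank-lines decomposition (objective: simpler).

-- ===== PORT A =====
-- single pass: skip blank lines, remember the current section header, insert "" before a
-- comment when a section is already open and output is nonempty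
-- loop body of A, named so the proofs can speak about one iteration
def pvStepA (st : String × List String) (line : String) : String × List String :=
  let line := PySem.Str.strip line
  if line = "" then st
  else if PySem.Str.startswith line "//" then
    let org := if st.1 ≠ "" ∧ st.2 ≠ [] then st.2 ++ [""] else st.2
    (line, org ++ [line])
  else (st.1, st.2 ++ [line])

def optimize_ladder_organization_py (ladder_logic : String) : String :=
  let lines := (PySem.Str.split? ladder_logic "\n").getD []
  let final := lines.foldl pvStepA ("", [])
  PySem.Str.join "\n" final.2

-- ===== PORT B =====
def pvIsComment (l : String) : Bool := PySem.Str.startswith l "//"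

-- _group: ls is empty or starts with a comment; cut a new section before each later comment
def pvGroup : List String → List (List String)
  | [] => []
  | c :: t =>
      (c :: t.takeWhile (fun l => !pvIsComment l)) :: pvGroup (t.dropWhile (fun l => !pvIsComment l))
termination_by ls => ls.length
decreasing_by
  simpa using Nat.lt_succ_of_le (List.length_dropWhile_le _ t)

def optimize_ladder_organization_py_alt (ladder_logic : String) : String :=
  let lines := ((PySem.Str.split? ladder_logic "\n").getD []).filterMap (fun l =>
      let t := PySem.Str.strip l; if t = "" then none else some t)
  let pre := lines.takeWhile (fun l => !pvIsComment l)
  let rest := lines.dropWhile (fun l => !pvIsComment l)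
  let secs : List (List String) :=
    match pvGroup rest with
    | [] => if pre = [] then [] else [pre]
    | s :: ss => (pre ++ s) :: ss
  PySem.Str.join "\n\n" (secs.map (PySem.Str.join "\n"))

-- ===== PRECONDITION & SPEC =====
def Spec_optimize_ladder_organization_py (ladder_logic : String) (out : String) : Prop := out = optimize_ladder_organization_py_alt ladder_logic
instance (ladder_logic : String) (out : String) : Decidable (Spec_optimize_ladder_organization_py ladder_logic out) := by unfold Spec_optimize_ladder_organization_py; infer_instance

-- ===== CLAIM (what is proved, stated in full; the proofs are below) =====
def Claim_equal_optimize_ladder_organization_py : Prop := ∀ (ladder_logic : String), Dom_optimize_ladder_organization_py ladder_logic → Spec_optimize_ladder_organization_py ladder_logic (optimize_ladder_organization_py ladder_logic)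


-- ===== LEMMAS AND PROOFS =====

-- the cleaned line list both programs work on
def pvClean (lines : List String) : List String :=
  lines.filterMap (fun l => let t := PySem.Str.strip l; if t = "" then none else some t)

-- A's per-line step after blanks are removed
def pvStep (st : String × List String) (l : String) : String × List String :=
  if pvIsComment l then
    (l, (if st.1 ≠ "" ∧ st.2 ≠ [] then st.2 ++ [""] else st.2) ++ [l])
  else (st.1, st.2 ++ [l])

-- A's organized list after a section is open: a blank before every comment
def pvBlanks (ls : List String) : List String :=
  ls.flatMap (fun l => if pvIsComment l then ["", l] else [l])

theorem pvComment_ne_empty {l : String} (h : pvIsComment l = true) : l ≠ "" := by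
  intro he; subst he
  simp [pvIsComment, PySem.Str.startswith] at h
  rw [PySem.Chars.startswith_iff] at h
  simp at h

theorem pvStepA_eq (st : String × List String) (l : String) :
    pvStepA st l = if PySem.Str.strip l = "" then st else pvStep st (PySem.Str.strip l) := by
  by_cases h : PySem.Str.strip l = "" <;> simp [pvStepA, pvStep, pvIsComment, h]

theorem pvClean_cons (l : String) (ls : List String) :
    pvClean (l :: ls) =
      if PySem.Str.strip l = "" then pvClean ls else PySem.Str.strip l :: pvClean ls := by
  by_cases h : PySem.Str.strip l = "" <;> simp [pvClean, h]

theorem pvFoldA_clean (lines : List String) (st : String × List String) :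
    lines.foldl pvStepA st = (pvClean lines).foldl pvStep st := by
  induction lines generalizing st with
  | nil => rfl
  | cons l ls ih =>
      rw [List.foldl_cons, pvClean_cons, pvStepA_eq]
      by_cases h : PySem.Str.strip l = "" <;>
        simp only [h, if_true, if_false]
      · exact ih st
      · rw [List.foldl_cons]; exact ih _

theorem pvPrePhase (pre : List String) (org : List String)
    (h : ∀ l ∈ pre, pvIsComment l = false) :
    pre.foldl pvStep ("", org) = ("", org ++ pre) := by
  induction pre generalizing org with
  | nil => simp
  | cons p ps ih =>
      have hp : pvIsComment p = false := h p (by simp)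
      simp [pvStep, hp]
      rw [ih _ (fun l hl => h l (by simp [hl]))]
      simp

theorem pvBlankPhase (ls : List String) (cs : String) (org : List String)
    (hcs : cs ≠ "") (horg : org ≠ []) :
    (ls.foldl pvStep (cs, org)).2 = org ++ pvBlanks ls := by
  induction ls generalizing cs org with
  | nil => simp [pvBlanks]
  | cons l t ih =>
      by_cases h : pvIsComment l = true
      · simp [pvStep, h, hcs, horg]
        rw [ih l (org ++ ["", l]) (pvComment_ne_empty h) (by simp)]
        simp [pvBlanks, h]
      · simp at h
        simp [pvStep, h]
        rw [ih cs (org ++ [l]) hcs (by simp)]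
        simp [pvBlanks, h]

-- Str.join facts, via the Chars bridge
theorem pvJoin_nil (sep : String) : PySem.Str.join sep [] = "" := by
  apply String.toList_inj.mp; simp [PySem.Chars.join_nil]

theorem pvJoin_singleton (sep p : String) : PySem.Str.join sep [p] = p := by
  apply String.toList_inj.mp; simp [PySem.Chars.join_singleton]

theorem pvJoin_cons_cons (sep p q : String) (rest : List String) :
    PySem.Str.join sep (p :: q :: rest) = p ++ sep ++ PySem.Str.join sep (q :: rest) := by
  apply String.toList_inj.mp; simp [PySem.Chars.join_cons_cons]

theorem pvCharsBlankSplit (s : List Char) (A ys : List (List Char))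
    (hA : A ≠ []) (hys : ys ≠ []) :
    PySem.Chars.join s (A ++ [] :: ys) =
      PySem.Chars.join s A ++ s ++ s ++ PySem.Chars.join s ys := by
  obtain ⟨y, ys', rfl⟩ := List.exists_cons_of_ne_nil hys
  induction A with
  | nil => simp at hA
  | cons p A' ih =>
      cases A' with
      | nil => simp [PySem.Chars.join_cons_cons, PySem.Chars.join_singleton]
      | cons q A'' =>
          have h2 := ih (by simp)
          simp only [List.cons_append] at h2 ⊢
          rw [PySem.Chars.join_cons_cons, PySem.Chars.join_cons_cons s p q A'', h2]
          simp [List.append_assoc]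

theorem pvJoinBlankSplit (a ys : List String) (ha : a ≠ []) (hys : ys ≠ []) :
    PySem.Str.join "\n" (a ++ "" :: ys) =
      PySem.Str.join "\n" a ++ "\n\n" ++ PySem.Str.join "\n" ys := by
  apply String.toList_inj.mp
  simp only [PySem.Str.toList_join, String.toList_append, List.map_append, List.map_cons]
  rw [show String.toList "" = [] from rfl]
  rw [pvCharsBlankSplit _ _ _ (by simpa using ha) (by simpa using hys)]
  simp only [List.append_assoc]
  congr 1

theorem pvBlanks_cons_true (x : String) (t' : List String) (h : pvIsComment x = true) :
    pvBlanks (x :: t') = "" :: x :: pvBlanks t' := by simp [pvBlanks, h]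

theorem pvBlanks_cons_false (x : String) (t' : List String) (h : pvIsComment x = false) :
    pvBlanks (x :: t') = x :: pvBlanks t' := by simp [pvBlanks, h]

-- the central bridge: A's inline-blank list joined with "\n" equals B's sections joined with "\n\n"
theorem pvMainJoin (t : List String) (a : List String) (ha : a ≠ []) :
    PySem.Str.join "\n" (a ++ pvBlanks t) =
      PySem.Str.join "\n\n"
        (((a ++ t.takeWhile (fun l => !pvIsComment l)) ::
            pvGroup (t.dropWhile (fun l => !pvIsComment l))).map (PySem.Str.join "\n")) := by
  induction t generalizing a with
  | nil => simp [pvBlanks, pvGroup, pvJoin_singleton]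
  | cons x t' ih =>
      by_cases h : pvIsComment x = true
      · have h3 := ih [x] (by simp)
        simp only [List.singleton_append, List.map_cons] at h3
        rw [pvBlanks_cons_true x t' h]
        simp only [List.takeWhile_cons, List.dropWhile_cons, h, Bool.not_true,
          Bool.false_eq_true, if_false, List.append_nil]
        rw [pvJoinBlankSplit a (x :: pvBlanks t') ha (by simp)]
        rw [pvGroup]
        simp only [List.map_cons]
        rw [pvJoin_cons_cons, h3]
      · have hf : pvIsComment x = false := by simpa using h
        rw [pvBlanks_cons_false x t' hf]
        have h4 := ih (a ++ [x]) (by simp)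
        rw [show a ++ x :: pvBlanks t' = (a ++ [x]) ++ pvBlanks t' from by simp, h4]
        simp [hf, List.append_assoc]

theorem pvDropWhile_head {p : String → Bool} (l : List String) (x : String) (xs : List String)
    (h : l.dropWhile p = x :: xs) : p x = false := by
  induction l with
  | nil => simp at h
  | cons a t ih =>
      by_cases ha : p a = true
      · rw [List.dropWhile_cons_of_pos ha] at h; exact ih h
      · rw [List.dropWhile_cons_of_neg (by simpa using ha)] at h
        cases h; simpa using ha

-- ===== VERDICT (by name: the statement is the Claim_ definition above) =====
theorem optimize_ladder_organization_py_spec : Claim_equal_optimize_ladder_organization_py := by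
  intro s _
  unfold Spec_optimize_ladder_organization_py
  unfold optimize_ladder_organization_py optimize_ladder_organization_py_alt
  simp only []
  rw [pvFoldA_clean]
  set lines := (PySem.Str.split? s "\n").getD [] with hlines
  have hcl : (lines.filterMap (fun l =>
      let t := PySem.Str.strip l; if t = "" then none else some t)) = pvClean lines := rfl
  rw [hcl]
  set cl := pvClean lines with hcldef
  set pre := cl.takeWhile (fun l => !pvIsComment l) with hpre
  set rest := cl.dropWhile (fun l => !pvIsComment l) with hrest
  have hsplit : cl = pre ++ rest := (List.takeWhile_append_dropWhile).symm
  have hprec : ∀ l ∈ pre, pvIsComment l = false := by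
    intro l hl
    have := List.mem_takeWhile_imp hl
    simpa using this
  rw [show cl.foldl pvStep ("", []) = (pre ++ rest).foldl pvStep ("", []) from by rw [← hsplit]]
  rw [List.foldl_append, pvPrePhase pre [] hprec]
  simp only [List.nil_append]
  cases hr : rest with
  | nil =>
      simp only [List.foldl_nil, pvGroup]
      by_cases hp : pre = []
      · simp [hp, pvJoin_nil]
      · simp [hp, pvJoin_singleton]
  | cons c t =>
      have hc : pvIsComment c = true := by
        have := pvDropWhile_head cl c t (by rw [← hrest, hr])
        simpa using this
      have hcne : c ≠ "" := pvComment_ne_empty hc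
      rw [show (c :: t).foldl pvStep ("", pre) = t.foldl pvStep (c, pre ++ [c]) from by
        simp [pvStep, hc]]
      rw [pvBlankPhase t c (pre ++ [c]) hcne (by simp)]
      rw [show pre ++ [c] ++ pvBlanks t = (pre ++ [c]) ++ pvBlanks t from by simp]
      rw [pvMainJoin t (pre ++ [c]) (by simp)]
      rw [pvGroup]
      simp [List.append_assoc]
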